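-- pv_equiv track=rewrite | github.com/eggduzao/Gusmao_RGT | Code/MotifAnalysisLatestBeforeRegulatoryAnalysisTools/MotifAnalysisPackage/build/lib/motifStatistics/constants.py | getChromList
-- ===== SOURCE A (Python) =====
-- def getChromList(x=True, y=True, m=True, reference=[]):
--     """Returns a chromosome aliases list.
--
--     Keyword arguments:
--     x -- Wether the chrX will be present or not. (default True)
--     y -- Wether the chrY will be present or not. (default True)
--     m -- Wether the chrM will be present or not. (default True)
--     reference -- List of dictionaries. The returned chromList will only contain entries that appear on any of these dictionaries.
--
--     Returns:
--     chromList -- List of chromosome aliases.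
--     """
--
--     if(not reference): # Creating basic chromosome list
--         chromList = ["chr"+str(e) for e in range(1,23)]
--         if(x): chromList.append("chrX")
--         if(y): chromList.append("chrY")
--         if(m): chromList.append("chrM")
--     else: # Filtering by reference
--         chromList = []
--         for n in [str(e) for e in range(1,23)] + ["X","Y","M"]:
--             appears = False
--             for d in reference:
--                 if("chr"+n in d.keys()):
--                     appears = True
--                     break
--             if(appears): chromList.append("chr"+n)
--     return chromList
-- ===== SOURCE B (Python) =====
-- def getChromList(x=True, y=True, m=True, reference=[]):
--     """Returns a chromosome aliases list (union-index re-implementation)."""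
--     if not reference:
--         return (["chr" + str(e) for e in range(1, 23)]
--                 + ["chr" + s for s, flag in (("X", x), ("Y", y), ("M", m)) if flag])
--     keys = set()
--     for d in reference:
--         keys.update(d.keys())
--     candidates = [str(e) for e in range(1, 23)] + ["X", "Y", "M"]
--     return ["chr" + n for n in candidates if "chr" + n in keys]
-- ===== Notes on version B (the rewrite author's own statement) =====
-- stated objective: idiomatic
-- what changed: The filtering branch builds one union set of all reference keys up front and then does a single filtering pass over the candidate order, instead of an inner scan over every reference dict for each of the 25 candidates; the empty-reference branch becomes a single comprehension instead of flag-driven appends.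
import Mathlib
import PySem

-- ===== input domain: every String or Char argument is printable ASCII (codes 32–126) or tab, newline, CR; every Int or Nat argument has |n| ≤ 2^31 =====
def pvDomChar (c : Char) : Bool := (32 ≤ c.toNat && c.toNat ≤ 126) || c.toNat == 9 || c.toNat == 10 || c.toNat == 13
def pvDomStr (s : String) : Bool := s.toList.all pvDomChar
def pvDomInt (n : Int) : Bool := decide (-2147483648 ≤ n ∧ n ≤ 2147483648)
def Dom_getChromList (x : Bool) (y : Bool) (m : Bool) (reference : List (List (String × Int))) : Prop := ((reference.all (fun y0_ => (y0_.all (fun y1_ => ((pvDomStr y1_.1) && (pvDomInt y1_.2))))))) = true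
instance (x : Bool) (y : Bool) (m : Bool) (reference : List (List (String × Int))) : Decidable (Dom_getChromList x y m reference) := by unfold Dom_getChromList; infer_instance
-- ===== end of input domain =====

-- B replaces A's per-candidate inner scan over the reference dicts by one union set of
-- all reference keys built up front, followed by a single filtering pass (idiomatic).

-- ===== PORT A =====
def getChromList (x : Bool) (y : Bool) (m : Bool) (reference : List (List (String × Int))) : List String :=
  if reference.isEmpty then
    -- chromList = ["chr"+str(e) for e in range(1,23)]; conditional appends
    let chromList := (PySem.List.pyRange 1 23 1).map (fun e => "chr" ++ PySem.Int.toStr e)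
    let chromList := if x then chromList ++ ["chrX"] else chromList
    let chromList := if y then chromList ++ ["chrY"] else chromList
    if m then chromList ++ ["chrM"] else chromList
  else
    -- for n in [str(e) for e in range(1,23)] + ["X","Y","M"]:
    --   appears = False; for d in reference: if "chr"+n in d.keys(): appears = True; break
    ((PySem.List.pyRange 1 23 1).map (fun e => PySem.Int.toStr e) ++ ["X", "Y", "M"]).foldl
      (fun chromList n =>
        let appears := reference.any (fun d => (PySem.Dict.mk d).contains ("chr" ++ n))
        if appears then chromList ++ ["chr" ++ n] else chromList) []

-- ===== PORT B =====
def getChromList_alt (x : Bool) (y : Bool) (m : Bool) (reference : List (List (String × Int))) : List String :=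
  if reference.isEmpty then
    (PySem.List.pyRange 1 23 1).map (fun e => "chr" ++ PySem.Int.toStr e)
      ++ ([("X", x), ("Y", y), ("M", m)].filter (fun p => p.2)).map (fun p => "chr" ++ p.1)
  else
    -- keys = set(); for d in reference: keys.update(d.keys())
    let keys : PySem.Set String :=
      reference.foldl (fun s d => PySem.Set.update s ((PySem.Dict.mk d).keys)) PySem.Set.empty
    let candidates := (PySem.List.pyRange 1 23 1).map (fun e => PySem.Int.toStr e) ++ ["X", "Y", "M"]
    (candidates.filter (fun n => PySem.Set.contains keys ("chr" ++ n))).map (fun n => "chr" ++ n)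

-- ===== PRECONDITION & SPEC =====
def Spec_getChromList (x : Bool) (y : Bool) (m : Bool) (reference : List (List (String × Int))) (out : List String) : Prop := out = getChromList_alt x y m reference
instance (x : Bool) (y : Bool) (m : Bool) (reference : List (List (String × Int))) (out : List String) : Decidable (Spec_getChromList x y m reference out) := by unfold Spec_getChromList; infer_instance

-- ===== CLAIM (what is proved, stated in full; the proofs are below) =====
def Claim_equal_getChromList : Prop := ∀ (x : Bool) (y : Bool) (m : Bool) (reference : List (List (String × Int))), Dom_getChromList x y m reference → Spec_getChromList x y m reference (getChromList x y m reference)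

-- ===== LEMMAS AND PROOFS =====

-- Membership in the fold-built union set equals membership in the seed or in some dict's keys.
theorem mem_foldl_update_keys (reference : List (List (String × Int))) (s : PySem.Set String) (k : String) :
    (k ∈ reference.foldl (fun s d => PySem.Set.update s ((PySem.Dict.mk d).keys)) s) ↔
      k ∈ s ∨ ∃ d ∈ reference, k ∈ (PySem.Dict.mk d).keys := by
  induction reference generalizing s with
  | nil => simp
  | cons d t ih =>
      simp only [List.foldl_cons, ih, PySem.Set.mem_update, List.mem_cons]
      constructor
      · rintro (( h | h) | ⟨d', hd', hk⟩)
        · exact Or.inl h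
        · exact Or.inr ⟨d, Or.inl rfl, h⟩
        · exact Or.inr ⟨d', Or.inr hd', hk⟩
      · rintro (h | ⟨d', (rfl | hd'), hk⟩)
        · exact Or.inl (Or.inl h)
        · exact Or.inl (Or.inr hk)
        · exact Or.inr ⟨d', hd', hk⟩

-- A's 'appears' scan equals the union-set membership test.
theorem any_contains_eq_set_contains (reference : List (List (String × Int))) (k : String) :
    reference.any (fun d => (PySem.Dict.mk d).contains k) =
      PySem.Set.contains
        (reference.foldl (fun s d => PySem.Set.update s ((PySem.Dict.mk d).keys)) PySem.Set.empty) k := by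
  rw [Bool.eq_iff_iff, List.any_eq_true, PySem.Set.contains_iff, mem_foldl_update_keys]
  simp only [PySem.Dict.contains_iff_mem_keys]
  constructor
  · rintro ⟨d, hd, hk⟩; exact Or.inr ⟨d, hd, hk⟩
  · rintro (h | ⟨d, hd, hk⟩)
    · exact absurd h (by simp [PySem.Set.empty])
    · exact ⟨d, hd, hk⟩

theorem getChromList_spec_aux (x y m : Bool) (reference : List (List (String × Int))) :
    getChromList x y m reference = getChromList_alt x y m reference := by
  cases reference with
  | nil =>
      cases x <;> cases y <;> cases m <;> rfl
  | cons d0 t =>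
      show (if (d0 :: t).isEmpty then _ else _) = (if (d0 :: t).isEmpty then _ else _)
      simp only [List.isEmpty_cons, if_false, Bool.false_eq_true]
      rw [PySem.List.foldl_append_if
          (fun n => (d0 :: t).any (fun d => (PySem.Dict.mk d).contains ("chr" ++ n)))
          (fun n => "chr" ++ n)]
      simp only [List.nil_append]
      congr 1
      apply List.filter_congr
      intro n _
      exact any_contains_eq_set_contains (d0 :: t) ("chr" ++ n)

-- ===== VERDICT (by name: the statement is the Claim_ definition above) =====
theorem getChromList_spec : Claim_equal_getChromList := by
  intro x y m reference _
  exact getChromList_spec_aux x y m reference
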